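-- pv_equiv track=rewrite | github.com/Pierre-Sassoulas/pytest | src/_pytest/assertion/format_explanation.py | _split_explanation
-- ===== SOURCE A (Python) =====
-- def _split_explanation(explanation: str) -> list[str]:
--     r"""Return a list of individual lines in the explanation.
--
--     This will return a list of lines split on '\n{', '\n}' and '\n~'.
--     Any other newlines will be escaped and appear in the line as the
--     literal '\n' characters.
--     """
--     raw_lines = (explanation or "").split("\n")
--     lines = [raw_lines[0]]
--     for values in raw_lines[1:]:
--         if values and values[0] in ["{", "}", "~", ">"]:
--             lines.append(values)
--         else:
--             lines[-1] += "\\n" + values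
--     return lines
-- ===== SOURCE B (Python) =====
-- def _split_explanation(explanation: str) -> list[str]:
--     """Single character scan: break before a newline that is immediately
--     followed by one of '{', '}', '~', '>'; escape every other newline."""
--     s = explanation or ""
--     out = []
--     cur = []
--     n = len(s)
--     i = 0
--     while i < n:
--         c = s[i]
--         if c == "\n":
--             if i + 1 < n and s[i + 1] in "{}~>":
--                 out.append("".join(cur))
--                 cur = []
--             else:
--                 cur.append("\\n")
--         else:
--             cur.append(c)
--         i += 1
--     out.append("".join(cur))
--     return out
-- ===== Notes on version B (the rewrite author's own statement) =====
-- stated objective: alternative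
-- what changed: Replaced A's split-on-newline followed by an append-or-concatenate fold over the parts with a single left-to-right character scan that emits a segment exactly at a newline followed by a special char and escapes every other newline in place.
import Mathlib
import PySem

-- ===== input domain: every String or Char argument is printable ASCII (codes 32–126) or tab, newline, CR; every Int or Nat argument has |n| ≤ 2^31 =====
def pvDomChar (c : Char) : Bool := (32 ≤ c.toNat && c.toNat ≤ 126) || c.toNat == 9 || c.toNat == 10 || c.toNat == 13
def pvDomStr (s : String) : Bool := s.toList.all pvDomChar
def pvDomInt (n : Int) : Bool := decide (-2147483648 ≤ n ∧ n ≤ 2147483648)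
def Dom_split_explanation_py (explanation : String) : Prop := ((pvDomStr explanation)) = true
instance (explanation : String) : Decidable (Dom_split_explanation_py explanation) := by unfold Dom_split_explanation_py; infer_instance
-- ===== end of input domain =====

-- B replaces A's split-then-fold with a single character scan that emits a segment at each
-- newline followed by a special char and escapes other newlines in place (alternative, same cost).

-- ===== PORT A =====
-- A: split on '\n', then a fold that appends a new line or concatenates onto the last one.
def split_explanation_py (explanation : String) : List String :=
  let s := if explanation = "" then "" else explanation     -- (explanation or "")
  let raw_lines : List (List Char) := PySem.Chars.splitOn s.toList ['\n']
  let lines0 : List (List Char) := [raw_lines.headI]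
  let lines := raw_lines.tail.foldl
    (fun lines v =>
      if v ≠ [] ∧ v.headI ∈ ['{', '}', '~', '>'] then lines ++ [v]
      else lines.dropLast ++ [lines.getLastD [] ++ ('\\' :: 'n' :: v)])
    lines0
  lines.map String.ofList

-- ===== PORT B =====
-- B's while loop over indices: recursion over the remaining characters with the current segment.
def split_explanation_py_altGo : List Char → List Char → List String
  | [], cur => [String.ofList cur]
  | '\n' :: rest, cur =>
    match rest with
    | [] => [String.ofList (cur ++ ['\\', 'n'])]
    | c :: rs =>
      if c ∈ ['{', '}', '~', '>'] then String.ofList cur :: split_explanation_py_altGo (c :: rs) []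
      else split_explanation_py_altGo (c :: rs) (cur ++ ['\\', 'n'])
  | c :: rest, cur => split_explanation_py_altGo rest (cur ++ [c])
termination_by l _ => l.length

def split_explanation_py_alt (explanation : String) : List String :=
  let s := if explanation = "" then "" else explanation     -- (explanation or "")
  split_explanation_py_altGo s.toList []

-- ===== PRECONDITION & SPEC =====
def Spec_split_explanation_py (explanation : String) (out : List String) : Prop := out = split_explanation_py_alt explanation
instance (explanation : String) (out : List String) : Decidable (Spec_split_explanation_py explanation out) := by unfold Spec_split_explanation_py; infer_instance

-- ===== CLAIM (what is proved, stated in full; the proofs are below) =====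
def Claim_equal_split_explanation_py : Prop := ∀ (explanation : String), Dom_split_explanation_py explanation → Spec_split_explanation_py explanation (split_explanation_py explanation)

-- ===== LEMMAS AND PROOFS =====

-- reference split of a char list on '\n'
def mySplit : List Char → List (List Char)
  | [] => [[]]
  | c :: r => if c = '\n' then [] :: mySplit r
              else (c :: (mySplit r).headI) :: (mySplit r).tail

theorem mySplit_ne_nil (l : List Char) : mySplit l ≠ [] := by
  cases l with
  | nil => simp [mySplit]
  | cons c r => simp only [mySplit]; split <;> simp

theorem mySplit_cons (l : List Char) : mySplit l = (mySplit l).headI :: (mySplit l).tail := by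
  cases h : mySplit l with
  | nil => exact absurd h (mySplit_ne_nil l)
  | cons a t => simp

-- characterisation of PySem.Chars.splitOn.go for the single-char separator '\n'
theorem splitOn_go_eq (fuel : Nat) (l cur : List Char) (acc : List (List Char))
    (h : l.length < fuel) :
    PySem.Chars.splitOn.go ['\n'] fuel l cur acc
      = acc.reverse ++ ((cur.reverse ++ (mySplit l).headI) :: (mySplit l).tail) := by
  induction fuel generalizing l cur acc with
  | zero => omega
  | succ f ih =>
    cases l with
    | nil =>
      rw [PySem.Chars.splitOn.go.eq_def]
      simp [mySplit]
    | cons c rest =>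
      rw [PySem.Chars.splitOn.go]
      by_cases hc : c = '\n'
      · subst hc
        have hpre : List.isPrefixOf ['\n'] ('\n' :: rest) = true := by
          simp [List.isPrefixOf]
        rw [if_pos hpre]
        simp only [List.length_cons, List.length_nil, List.drop_succ_cons, List.drop_zero]
        rw [ih rest [] (cur.reverse :: acc) (by simpa using Nat.lt_of_succ_lt_succ (by simpa using h))]
        simp [mySplit]
        rw [mySplit_cons rest]
        simp
      · have hpre : ¬ (List.isPrefixOf ['\n'] (c :: rest) = true) := by
          simp [List.isPrefixOf]; exact fun hh => absurd hh.symm hc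
        rw [if_neg hpre]
        rw [ih rest (c :: cur) acc (by simpa using Nat.lt_of_succ_lt_succ (by simpa using h))]
        simp [mySplit, hc]

theorem splitOn_eq_mySplit (l : List Char) :
    PySem.Chars.splitOn l ['\n'] = mySplit l := by
  show PySem.Chars.splitOn.go ['\n'] (l.length + 1) l [] [] = mySplit l
  rw [splitOn_go_eq (l.length + 1) l [] [] (Nat.lt_succ_self _)]
  simpa using (mySplit_cons l).symm

-- combine the split parts the way A's fold does, as a plain recursion on the parts
def comb : List Char → List (List Char) → List (List Char)
  | a, [] => [a]
  | a, p :: ps =>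
    if p ≠ [] ∧ p.headI ∈ ['{', '}', '~', '>'] then a :: comb p ps
    else comb (a ++ ('\\' :: 'n' :: p)) ps

-- A's left fold, with an arbitrary untouched prefix, equals comb on the last line
theorem foldl_eq_comb (ps : List (List Char)) (pre : List (List Char)) (a : List Char) :
    (ps.foldl
      (fun lines v =>
        if v ≠ [] ∧ v.headI ∈ ['{', '}', '~', '>'] then lines ++ [v]
        else lines.dropLast ++ [lines.getLastD [] ++ ('\\' :: 'n' :: v)])
      (pre ++ [a]))
      = pre ++ comb a ps := by
  induction ps generalizing pre a with
  | nil => simp [comb]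
  | cons p ps ih =>
    simp only [List.foldl_cons, comb]
    by_cases hp : p ≠ [] ∧ p.headI ∈ ['{', '}', '~', '>']
    · rw [if_pos hp, if_pos hp]
      have := ih (pre ++ [a]) p
      simpa using this
    · rw [if_neg hp, if_neg hp]
      rw [List.dropLast_concat, List.getLastD_concat]
      rw [ih pre (a ++ ('\\' :: 'n' :: p))]

-- B's scan computes comb over mySplit
theorem altGo_eq_comb (l cur : List Char) :
    split_explanation_py_altGo l cur
      = (comb (cur ++ (mySplit l).headI) (mySplit l).tail).map String.ofList := by
  induction l, cur using split_explanation_py_altGo.induct with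
  | case1 cur => simp [split_explanation_py_altGo, mySplit, comb]
  | case2 cur =>
    simp [split_explanation_py_altGo, mySplit, comb]
  | case3 cur c rs hc ih =>
    have hne : c ≠ '\n' := by intro hh; subst hh; simp at hc
    have hrec : mySplit (c :: rs) = (c :: (mySplit rs).headI) :: (mySplit rs).tail := by
      simp [mySplit, hne]
    rw [split_explanation_py_altGo, if_pos hc, ih]
    have hrest : mySplit ('\n' :: c :: rs) = [] :: mySplit (c :: rs) := by
      simp [mySplit]
    rw [hrest, hrec]
    simp only [List.headI, List.tail, List.append_nil, List.nil_append]
    rw [comb, if_pos (by refine ⟨by simp, by simpa using hc⟩)]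
    simp
  | case4 cur c rs hc ih =>
    rw [split_explanation_py_altGo, if_neg hc, ih]
    have hrest : mySplit ('\n' :: c :: rs) = [] :: mySplit (c :: rs) := by
      simp [mySplit]
    rw [hrest]
    obtain ⟨h, t, hm⟩ : ∃ h t, mySplit (c :: rs) = h :: t := by
      cases hx : mySplit (c :: rs) with
      | nil => exact absurd hx (mySplit_ne_nil _)
      | cons a b => exact ⟨a, b, rfl⟩
    have hnp : ¬ (h ≠ [] ∧ h.headI ∈ ['{', '}', '~', '>']) := by
      by_cases hne : c = '\n'
      · subst hne
        have : h = [] := by simpa [mySplit] using congrArg List.headI hm.symm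
        simp [this]
      · have hrec : mySplit (c :: rs) = (c :: (mySplit rs).headI) :: (mySplit rs).tail := by
          simp [mySplit, hne]
        have hh : h = c :: (mySplit rs).headI := by
          rw [hrec] at hm
          injection hm with h1 h2
          exact h1.symm
        rintro ⟨-, hmem⟩
        rw [hh] at hmem
        simp only [List.headI] at hmem
        exact hc hmem
    rw [hm]
    simp only [List.headI, List.tail, List.append_nil]
    rw [comb, if_neg hnp]
    simp
  | case5 c rest cur hc ih =>
    have hne : c ≠ '\n' := hc
    rw [split_explanation_py_altGo]
    · rw [ih, show mySplit (c :: rest) = (c :: (mySplit rest).headI) :: (mySplit rest).tail from by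
        simp [mySplit, hne]]
      simp
    · exact hc

-- ===== VERDICT (by name: the statement is the Claim_ definition above) =====
theorem split_explanation_py_spec : Claim_equal_split_explanation_py := by
  intro explanation _
  unfold Spec_split_explanation_py split_explanation_py split_explanation_py_alt
  simp only [splitOn_eq_mySplit]
  set s := if explanation = "" then "" else explanation with hs
  rw [altGo_eq_comb]
  have := foldl_eq_comb (mySplit s.toList).tail [] (mySplit s.toList).headI
  simp only [List.nil_append] at this
  rw [this]
  simp
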